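-- pv_equiv track=rewrite | github.com/Misha-Mayskiy/algocoding | Informatics/OOP/epsilon.py | find_longest_symmetric_sequence
-- ===== SOURCE A (Python) =====
-- def is_symmetric(sequence, epsilon):
--     n = len(sequence)
--     for i in range(n // 2):
--         if abs(sequence[i] - sequence[n - i - 1]) > epsilon:
--             return False
--     return True
--
-- def find_longest_symmetric_sequence(sequence, epsilon):
--     n = len(sequence)
--     max_length = 0
--     best_sequence = []
--     for i in range(n):
--         for j in range(i + 1, n + 1):
--             sub_sequence = sequence[i:j]
--             if is_symmetric(sub_sequence, epsilon):
--                 if len(sub_sequence) > max_length: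
--                     max_length = len(sub_sequence)
--                     best_sequence = sub_sequence
--     return best_sequence
-- ===== SOURCE B (Python) =====
-- def find_longest_symmetric_sequence(sequence, epsilon):
--     # O(n^2) dynamic programming over substring lengths (two rolling rows),
--     # instead of re-slicing and re-checking every substring (O(n^3)).
--     n = len(sequence)
--     row_minus2 = []   # symmetry flags for substrings of length (length - 2)
--     row_minus1 = []   # symmetry flags for substrings of length (length - 1)
--     best_len = 0
--     best_start = 0
--     for length in range(1, n + 1):
--         if length == 1:
--             cur = [True] * n
--         elif length == 2:
--             cur = [abs(sequence[i] - sequence[i + 1]) <= epsilon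
--                    for i in range(n - 1)]
--         else:
--             cur = [abs(sequence[i] - sequence[i + length - 1]) <= epsilon
--                    and row_minus2[i + 1]
--                    for i in range(n - length + 1)]
--         for i in range(n - length + 1):
--             if cur[i]:
--                 best_len = length
--                 best_start = i
--                 break
--         row_minus2, row_minus1 = row_minus1, cur
--     return sequence[best_start:best_start + best_len]
-- ===== Notes on version B (the rewrite author's own statement) =====
-- stated objective: faster
-- what changed: Replaces the O(n^3) enumerate-every-substring-and-recheck scan with an O(n^2) dynamic programme over substring lengths: symmetry flags for length L are derived from the stored flags for length L-2 plus one outer-pair test, and the best (longest, leftmost) substring is tracked per length.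
import Mathlib
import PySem

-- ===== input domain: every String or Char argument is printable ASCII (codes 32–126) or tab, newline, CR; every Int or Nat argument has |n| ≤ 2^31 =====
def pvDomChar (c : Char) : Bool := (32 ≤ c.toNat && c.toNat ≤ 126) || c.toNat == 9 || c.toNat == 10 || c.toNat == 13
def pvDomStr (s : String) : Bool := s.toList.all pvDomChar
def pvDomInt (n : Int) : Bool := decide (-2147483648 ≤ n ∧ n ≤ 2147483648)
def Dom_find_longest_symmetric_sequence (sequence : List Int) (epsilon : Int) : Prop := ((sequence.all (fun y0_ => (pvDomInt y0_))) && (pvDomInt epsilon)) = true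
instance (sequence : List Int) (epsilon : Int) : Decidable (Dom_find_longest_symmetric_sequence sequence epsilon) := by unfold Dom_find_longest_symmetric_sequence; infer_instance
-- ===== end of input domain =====

-- B replaces A's O(n^3) enumerate-and-recheck of every substring by an O(n^2) dynamic
-- programme over substring lengths (symmetry flags for length L derived from those for L-2).

-- ===== PORT A =====
def is_symmetric (sequence : List Int) (epsilon : Int) : Bool :=
  let n : Int := PySem.List.len sequence
  (PySem.List.pyRange 0 (PySem.Int.floordiv n 2) 1).all (fun i =>
    !decide (|PySem.List.pyGetD sequence i 0 - PySem.List.pyGetD sequence (n - i - 1) 0| > epsilon))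

def find_longest_symmetric_sequence (sequence : List Int) (epsilon : Int) : List Int :=
  let n : Int := PySem.List.len sequence
  ((PySem.List.pyRange 0 n 1).foldl (fun (st : Int × List Int) i =>
    (PySem.List.pyRange (i + 1) (n + 1) 1).foldl (fun (st : Int × List Int) j =>
      let sub := PySem.List.slice sequence (some i) (some j)
      if is_symmetric sub epsilon then
        if PySem.List.len sub > st.1 then (PySem.List.len sub, sub) else st
      else st) st) ((0 : Int), ([] : List Int))).2

-- ===== PORT B =====
-- B-side helper: one iteration of Source B's loop over `length` (the literal loop body);
-- the state is (row_minus2, row_minus1, best_len, best_start).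
def blt_step (sequence : List Int) (epsilon : Int)
    (st : List Bool × List Bool × Int × Int) (length : Int) :
    List Bool × List Bool × Int × Int :=
  let n : Int := PySem.List.len sequence
  let cur : List Bool :=
    if length = 1 then List.replicate n.toNat true
    else if length = 2 then
      (PySem.List.pyRange 0 (n - 1) 1).map (fun i =>
        decide (|PySem.List.pyGetD sequence i 0 - PySem.List.pyGetD sequence (i + 1) 0| ≤ epsilon))
    else
      (PySem.List.pyRange 0 (n - length + 1) 1).map (fun i =>
        decide (|PySem.List.pyGetD sequence i 0 - PySem.List.pyGetD sequence (i + length - 1) 0| ≤ epsilon)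
          && PySem.List.pyGetD st.1 (i + 1) false)
  let best : Int × Int :=
    match cur.findIdx? (fun b => b) with
    | some i => (length, (i : Int))
    | none => (st.2.2.1, st.2.2.2)
  (st.2.1, cur, best.1, best.2)

def find_longest_symmetric_sequence_alt (sequence : List Int) (epsilon : Int) : List Int :=
  let n : Int := PySem.List.len sequence
  let fin := (PySem.List.pyRange 1 (n + 1) 1).foldl (blt_step sequence epsilon)
    (([] : List Bool), ([] : List Bool), (0 : Int), (0 : Int))
  PySem.List.slice sequence (some fin.2.2.2) (some (fin.2.2.2 + fin.2.2.1))

-- ===== PRECONDITION & SPEC =====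
def Spec_find_longest_symmetric_sequence (sequence : List Int) (epsilon : Int) (out : List Int) : Prop := out = find_longest_symmetric_sequence_alt sequence epsilon
instance (sequence : List Int) (epsilon : Int) (out : List Int) : Decidable (Spec_find_longest_symmetric_sequence sequence epsilon out) := by unfold Spec_find_longest_symmetric_sequence; infer_instance

-- ===== CLAIM (what is proved, stated in full; the proofs are below) =====
def Claim_equal_find_longest_symmetric_sequence : Prop := ∀ (sequence : List Int) (epsilon : Int), Dom_find_longest_symmetric_sequence sequence epsilon → Spec_find_longest_symmetric_sequence sequence epsilon (find_longest_symmetric_sequence sequence epsilon)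

-- ===== LEMMAS AND PROOFS =====

/- Specification layer: `symB a e l len` = the length-`len` substring of `a` starting at `l`
   is epsilon-symmetric; `bestLenM a e m` / `bestStartM a e m` = best (longest, then leftmost)
   over lengths ≤ m; `theBest` = the common value both ports are shown to return. -/

def symB (a : List Int) (e : Int) (l len : Nat) : Bool :=
  (List.range (len / 2)).all (fun k => decide (|a.getD (l + k) 0 - a.getD (l + len - 1 - k) 0| ≤ e))

def hasB (a : List Int) (e : Int) (len : Nat) : Bool :=
  (List.range (a.length + 1)).any (fun i => decide (i + len ≤ a.length) && symB a e i len)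

def bestLenM (a : List Int) (e : Int) (m : Nat) : Nat :=
  Nat.findGreatest (fun len => hasB a e len = true) m

def startP (a : List Int) (e : Int) (len i : Nat) : Bool :=
  decide (i + len ≤ a.length) && symB a e i len

def bestStartM (a : List Int) (e : Int) (m : Nat) : Nat :=
  (List.range (a.length + 1)).findIdx (startP a e (bestLenM a e m))

def theBest (a : List Int) (e : Int) : List Int :=
  (a.drop (bestStartM a e a.length)).take (bestLenM a e a.length)

-- A-side combinatorial reformulation: candidates (start, length) in A's scan order.
def candN (a : List Int) : List (Nat × Nat) :=
  (List.range a.length).flatMap (fun i => (List.range (a.length - i)).map (fun d => (i, d + 1)))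

def stepN (a : List Int) (e : Int) (st : Nat × List Int) (p : Nat × Nat) : Nat × List Int :=
  if symB a e p.1 p.2 && decide (st.1 < p.2) then (p.2, (a.drop p.1).take p.2) else st

-- basic symB facts
lemma symB_zero (a : List Int) (e : Int) (l : Nat) : symB a e l 0 = true := by
  simp [symB]

lemma symB_one (a : List Int) (e : Int) (l : Nat) : symB a e l 1 = true := by
  simp [symB]

lemma symB_two (a : List Int) (e : Int) (l : Nat) :
    symB a e l 2 = decide (|a.getD l 0 - a.getD (l + 1) 0| ≤ e) := by
  simp [symB, List.range_succ]

lemma all_congr_mem {α : Type} (l : List α) (p q : α → Bool) (h : ∀ x ∈ l, p x = q x) :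
    l.all p = l.all q := by
  induction l with
  | nil => rfl
  | cons x t ih => simp only [List.all_cons, h x (by simp), ih (fun y hy => h y (by simp [hy]))]

lemma findGreatest_pos_spec (P : Nat → Prop) [DecidablePred P] (n : Nat)
    (h : 0 < Nat.findGreatest P n) : P (Nat.findGreatest P n) := by
  induction n with
  | zero => simp [Nat.findGreatest] at h
  | succ n ih =>
    rw [Nat.findGreatest_succ] at h ⊢
    split_ifs at h ⊢ with hp
    · exact hp
    · exact ih h

lemma symB_step (a : List Int) (e : Int) (l len : Nat) (h : 2 ≤ len) :
    symB a e l len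
      = (decide (|a.getD l 0 - a.getD (l + len - 1) 0| ≤ e) && symB a e (l + 1) (len - 2)) := by
  have h2 : len / 2 = (len - 2) / 2 + 1 := by omega
  rw [symB, symB, h2, List.range_succ_eq_map]
  simp only [List.all_cons, List.all_map]
  have e0 : l + 0 = l := by omega
  have e1 : l + len - 1 - 0 = l + len - 1 := by omega
  rw [e0, e1]
  congr 1
  apply all_congr_mem
  intro k _
  simp only [Function.comp_apply, Nat.succ_eq_add_one]
  rw [decide_eq_decide]
  have e2 : l + (k + 1) = l + 1 + k := by omega
  have e3 : l + len - 1 - (k + 1) = l + 1 + (len - 2) - 1 - k := by omega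
  rw [e2, e3]

lemma length_sliceN (a : List Int) (i len : Nat) (h : i + len ≤ a.length) :
    ((a.drop i).take len).length = len := by
  simp [List.length_take, List.length_drop]; omega

lemma getD_sliceN (a : List Int) (i len k : Nat) (h1 : k < len) (h2 : i + len ≤ a.length) :
    ((a.drop i).take len).getD k 0 = a.getD (i + k) 0 := by
  have hk : k < ((a.drop i).take len).length := by rw [length_sliceN a i len h2]; exact h1
  have hik : i + k < a.length := by omega
  rw [List.getD_eq_getElem _ _ hk, List.getD_eq_getElem _ _ hik]
  simp [List.getElem_take, List.getElem_drop]

lemma getD_map_range' (f : Nat → Bool) (sz k : Nat) (h : k < sz) :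
    ((List.range sz).map f).getD k false = f k := by
  rw [List.getD_eq_getElem _ _ (by simpa using h)]
  simp

lemma is_symmetric_sliceN (a : List Int) (e : Int) (i len : Nat) (h : i + len ≤ a.length) :
    is_symmetric ((a.drop i).take len) e = symB a e i len := by
  have hlen : ((a.drop i).take len).length = len := length_sliceN a i len h
  simp only [is_symmetric, PySem.List.len_eq, hlen]
  have hfd : PySem.Int.floordiv (len : Int) 2 = ((len / 2 : Nat) : Int) := by
    exact_mod_cast PySem.Int.floordiv_natCast len 2
  rw [hfd, PySem.List.pyRange_zero_nat, List.all_map, symB]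
  apply all_congr_mem
  intro k hk
  have hk2 : k < len / 2 := by simpa using hk
  have hkl : k < len := by omega
  simp only [Function.comp_apply, PySem.List.pyGetD_natCast]
  have hcast : ((len : Int)) - (k : Int) - 1 = ((len - 1 - k : Nat) : Int) := by omega
  rw [hcast]
  simp only [PySem.List.pyGetD_natCast]
  rw [getD_sliceN a i len k hkl h, getD_sliceN a i len (len - 1 - k) (by omega) h]
  have hidx : i + (len - 1 - k) = i + len - 1 - k := by omega
  rw [hidx, ← decide_not]
  simp [not_lt]

-- generic relational fold lemma
lemma foldl_rel {α β γ : Type} (R : β → γ → Prop) (f : β → α → β) (g : γ → α → γ) :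
    ∀ (l : List α) (b : β) (c : γ), R b c → (∀ x ∈ l, ∀ b c, R b c → R (f b x) (g c x)) →
      R (l.foldl f b) (l.foldl g c) := by
  intro l
  induction l with
  | nil => intro b c h _; exact h
  | cons x t ih =>
    intro b c h hstep
    exact ih _ _ (hstep x (by simp) b c h) (fun y hy => hstep y (by simp [hy]))

lemma foldl_flatMap' {α β γ : Type} (f : α → List β) (g : γ → β → γ) :
    ∀ (l : List α) (init : γ),
      (l.flatMap f).foldl g init = l.foldl (fun c x => (f x).foldl g c) init := by
  intro l
  induction l with
  | nil => intro init; simp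
  | cons x t ih => intro init; simp [List.foldl_append, ih]

-- Stage 1: port A equals the fold of stepN over candN.
lemma A_inner (a : List Int) (e : Int) (i : Nat) (hi' : i < a.length)
    (x : Int × List Int) (y : Nat × List Int) (hxy : x.1 = (y.1 : Int) ∧ x.2 = y.2) :
    (((PySem.List.pyRange ((i : Int) + 1) ((a.length : Int) + 1) 1).foldl
        (fun (st : Int × List Int) j =>
          let sub := PySem.List.slice a (some (i : Int)) (some j)
          if is_symmetric sub e then
            if PySem.List.len sub > st.1 then (PySem.List.len sub, sub) else st
          else st) x).1
      = ((((List.range (a.length - i)).map (fun d => (i, d + 1))).foldl (stepN a e) y).1 : Int))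
    ∧ ((PySem.List.pyRange ((i : Int) + 1) ((a.length : Int) + 1) 1).foldl
        (fun (st : Int × List Int) j =>
          let sub := PySem.List.slice a (some (i : Int)) (some j)
          if is_symmetric sub e then
            if PySem.List.len sub > st.1 then (PySem.List.len sub, sub) else st
          else st) x).2
      = (((List.range (a.length - i)).map (fun d => (i, d + 1))).foldl (stepN a e) y).2 := by
  rw [PySem.List.pyRange_one]
  have hcnt : (((a.length : Int)) + 1 - ((i : Int) + 1)).toNat = a.length - i := by omega
  rw [hcnt, List.foldl_map, List.foldl_map]
  refine foldl_rel
    (fun (x : Int × List Int) (y : Nat × List Int) => x.1 = (y.1 : Int) ∧ x.2 = y.2)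
    _ _ (List.range (a.length - i)) x y hxy ?_
  intro d hd x' y' hxy'
  have hd' : d < a.length - i := by simpa using hd
  have hsub : i + (d + 1) ≤ a.length := by omega
  dsimp only
  have hidx : ((i : Int) + 1 + (d : Int)) = (i : Int) + ((d + 1 : Nat) : Int) := by push_cast; ring
  rw [hidx, PySem.List.slice_natCast_add]
  rw [PySem.List.len_eq, length_sliceN a i (d + 1) hsub, is_symmetric_sliceN a e i (d + 1) hsub]
  obtain ⟨g1, g2⟩ := hxy'
  by_cases hs : symB a e i (d + 1) = true
  · by_cases hlt : y'.1 < d + 1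
    · have hgt : ((d + 1 : Nat) : Int) > x'.1 := by rw [g1]; exact_mod_cast hlt
      have hle : x'.1 ≤ (d : Int) := by omega
      simp [stepN, hs, hlt, hle]
    · have hgt : ¬ ((d + 1 : Nat) : Int) > x'.1 := by rw [g1]; exact_mod_cast hlt
      have hnle : ¬ y'.1 ≤ d := by omega
      simp [stepN, hs, hlt, hnle, g1, g2]
  · simp [stepN, hs, g1, g2]

lemma A_foldN (a : List Int) (e : Int) :
    find_longest_symmetric_sequence a e = ((candN a).foldl (stepN a e) (0, [])).2 := by
  rw [candN, foldl_flatMap']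
  simp only [find_longest_symmetric_sequence, PySem.List.len_eq]
  rw [PySem.List.pyRange_zero_nat, List.foldl_map]
  have key := foldl_rel
    (fun (x : Int × List Int) (y : Nat × List Int) => x.1 = (y.1 : Int) ∧ x.2 = y.2)
    (fun (st : Int × List Int) (k : Nat) =>
      (PySem.List.pyRange ((k : Int) + 1) ((a.length : Int) + 1) 1).foldl
        (fun (st : Int × List Int) j =>
          let sub := PySem.List.slice a (some (k : Int)) (some j)
          if is_symmetric sub e then
            if PySem.List.len sub > st.1 then (PySem.List.len sub, sub) else st
          else st) st)
    (fun (st : Nat × List Int) (i : Nat) =>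
      ((List.range (a.length - i)).map (fun d => (i, d + 1))).foldl (stepN a e) st)
    (List.range a.length) ((0 : Int), ([] : List Int)) ((0 : Nat), ([] : List Int))
    ⟨rfl, rfl⟩ ?_
  · exact key.2
  intro i hi x y hxy
  exact A_inner a e i (by simpa using hi) x y hxy

-- Stage 2: characterisation of the stepN fold ("first candidate achieving the maximum").
lemma fold_char (a : List Int) (e : Int) :
    ∀ (ps : List (Nat × Nat)) (st : Nat × List Int),
      st.1 ≤ (ps.foldl (stepN a e) st).1 ∧
      ((ps.foldl (stepN a e) st) = st ∧ (∀ p ∈ ps, symB a e p.1 p.2 = true → p.2 ≤ st.1) ∨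
       (∃ pre suf i len, ps = pre ++ (i, len) :: suf ∧ symB a e i len = true ∧
          (ps.foldl (stepN a e) st).1 = len ∧ (ps.foldl (stepN a e) st).2 = (a.drop i).take len ∧
          st.1 < len ∧ (∀ p ∈ pre, symB a e p.1 p.2 = true → p.2 < len) ∧
          (∀ p ∈ suf, symB a e p.1 p.2 = true → p.2 ≤ len))) := by
  intro ps
  induction ps with
  | nil =>
    intro st
    exact ⟨le_rfl, Or.inl ⟨rfl, by simp⟩⟩
  | cons hd t ih =>
    obtain ⟨i0, l0⟩ := hd
    intro st
    simp only [List.foldl_cons]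
    obtain ⟨ih1, ih2⟩ := ih (stepN a e st (i0, l0))
    have hmono : st.1 ≤ (stepN a e st (i0, l0)).1 := by
      rw [stepN]; split
      · rename_i hcond
        simp only [Bool.and_eq_true, decide_eq_true_eq] at hcond
        exact le_of_lt hcond.2
      · exact le_rfl
    refine ⟨le_trans hmono ih1, ?_⟩
    by_cases hupd : (symB a e i0 l0 && decide (st.1 < l0)) = true
    · have hst' : stepN a e st (i0, l0) = (l0, (a.drop i0).take l0) := by
        rw [stepN, if_pos hupd]
      simp only [Bool.and_eq_true, decide_eq_true_eq] at hupd
      obtain ⟨hsym, hlt⟩ := hupd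
      rcases ih2 with ⟨hr, hb⟩ | ⟨pre, suf, i, len, heq, hsym', hr1, hr2, hlt', hpre, hsuf⟩
      · right
        refine ⟨[], t, i0, l0, by simp, hsym, ?_, ?_, hlt, by simp, ?_⟩
        · rw [hr, hst']
        · rw [hr, hst']
        · intro p hp hs
          have := hb p hp hs
          rw [hst'] at this
          simpa using this
      · have hl0len : l0 < len := by
          have h1 : (stepN a e st (i0, l0)).1 = l0 := by rw [hst']
          omega
        right
        refine ⟨(i0, l0) :: pre, suf, i, len, by simp [heq], hsym', hr1, hr2, by omega, ?_, hsuf⟩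
        intro p hp hs
        rcases List.mem_cons.1 hp with rfl | hp'
        · exact hl0len
        · exact hpre p hp' hs
    · have hst' : stepN a e st (i0, l0) = st := by rw [stepN, if_neg hupd]
      rw [hst'] at ih1 ih2 ⊢
      have hhd : symB a e i0 l0 = true → l0 ≤ st.1 := by
        intro hs
        by_contra hc
        exact hupd (by simp [hs]; omega)
      rcases ih2 with ⟨hr, hb⟩ | ⟨pre, suf, i, len, heq, hsym', hr1, hr2, hlt', hpre, hsuf⟩
      · left
        refine ⟨hr, ?_⟩
        intro p hp hs
        rcases List.mem_cons.1 hp with rfl | hp'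
        · exact hhd hs
        · exact hb p hp' hs
      · right
        refine ⟨(i0, l0) :: pre, suf, i, len, by simp [heq], hsym', hr1, hr2, hlt', ?_, hsuf⟩
        intro p hp hs
        rcases List.mem_cons.1 hp with rfl | hp'
        · exact lt_of_le_of_lt (hhd hs) hlt'
        · exact hpre p hp' hs

lemma mem_candN (a : List Int) (p : Nat × Nat) :
    p ∈ candN a ↔ 1 ≤ p.2 ∧ p.1 + p.2 ≤ a.length := by
  obtain ⟨i, len⟩ := p
  simp only [candN, List.mem_flatMap, List.mem_map, List.mem_range]
  constructor
  · rintro ⟨i', hi', d, hd, heq⟩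
    injection heq with h1 h2
    subst h1
    omega
  · rintro ⟨h1, h2⟩
    exact ⟨i, by omega, ⟨len - 1, by omega, by simp; omega⟩⟩

lemma pairwise_candN (a : List Int) :
    (candN a).Pairwise (fun p q => p.1 < q.1 ∨ (p.1 = q.1 ∧ p.2 < q.2)) := by
  rw [candN, List.pairwise_flatMap]
  constructor
  · intro i _
    rw [List.pairwise_map]
    exact (List.pairwise_lt_range).imp (fun h => Or.inr ⟨rfl, by omega⟩)
  · apply (List.pairwise_lt_range).imp
    intro i j hij x hx y hy
    obtain ⟨d, -, rfl⟩ := List.mem_map.1 hx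
    obtain ⟨d', -, rfl⟩ := List.mem_map.1 hy
    exact Or.inl hij

lemma hasB_iff (a : List Int) (e : Int) (len : Nat) :
    hasB a e len = true ↔ ∃ i, i + len ≤ a.length ∧ symB a e i len = true := by
  simp only [hasB, List.any_eq_true, List.mem_range]
  constructor
  · rintro ⟨i, _, h⟩
    simp only [Bool.and_eq_true, decide_eq_true_eq] at h
    exact ⟨i, h.1, h.2⟩
  · rintro ⟨i, h1, h2⟩
    exact ⟨i, by omega, by simp [h1, h2]⟩

lemma findIdx_range_eq (p : Nat → Bool) (sz k : Nat) (hk : k < sz)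
    (hp : p k = true) (hlow : ∀ j, j < k → p j = false) :
    (List.range sz).findIdx p = k := by
  rw [List.findIdx_eq (by simpa using hk)]
  refine ⟨by simpa using hp, ?_⟩
  intro j hj
  simpa using hlow j hj

-- Stage 3: port A returns theBest.
lemma A_char (a : List Int) (e : Int) :
    find_longest_symmetric_sequence a e = theBest a e := by
  rw [A_foldN]
  obtain ⟨-, hchar⟩ := fold_char a e (candN a) ((0 : Nat), ([] : List Int))
  rcases hchar with ⟨hr, hball⟩ | ⟨pre, suf, i, len, heq, hsym, hr1, hr2, hlt, hpre, hsuf⟩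
  · rcases Nat.eq_zero_or_pos a.length with hn | hn
    · obtain rfl : a = [] := List.length_eq_zero_iff.1 hn
      rw [hr]
      simp [theBest, bestLenM]
    · exfalso
      have h01 := hball (0, 1) ((mem_candN a (0, 1)).2 (by constructor <;> omega)) (symB_one a e 0)
      simp at h01
  · have hmem : (i, len) ∈ candN a := by rw [heq]; simp
    obtain ⟨h1len, hile⟩ := (mem_candN a (i, len)).1 hmem
    have hall : ∀ p ∈ candN a, symB a e p.1 p.2 = true → p.2 ≤ len := by
      intro p hp hs
      rw [heq] at hp
      rcases List.mem_append.1 hp with h | h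
      · exact le_of_lt (hpre p h hs)
      · rcases List.mem_cons.1 h with rfl | h'
        · exact le_rfl
        · exact hsuf p h' hs
    have hLle : len ≤ bestLenM a e a.length :=
      Nat.le_findGreatest (by omega) ((hasB_iff a e len).2 ⟨i, hile, hsym⟩)
    have hLge : bestLenM a e a.length ≤ len := by
      have hpos : 0 < bestLenM a e a.length := by omega
      have hP : hasB a e (bestLenM a e a.length) = true := findGreatest_pos_spec _ _ hpos
      obtain ⟨i', hi', hs'⟩ := (hasB_iff a e _).1 hP
      exact hall (i', bestLenM a e a.length)
        ((mem_candN a _).2 ⟨by omega, hi'⟩) hs'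
    have hLen : bestLenM a e a.length = len := le_antisymm hLge hLle
    have hpred : startP a e len i = true := by simp [startP, hile, hsym]
    have hnone : ∀ j, j < i → startP a e len j = false := by
      intro j hj
      by_contra hb
      have hb' : startP a e len j = true := by
        cases hq : startP a e len j
        · exact absurd hq hb
        · rfl
      simp only [startP, Bool.and_eq_true, decide_eq_true_eq] at hb'
      obtain ⟨hjle, hjsym⟩ := hb'
      have hjmem : (j, len) ∈ candN a := (mem_candN a _).2 ⟨by omega, hjle⟩
      rw [heq] at hjmem
      rcases List.mem_append.1 hjmem with h | h
      · have := hpre _ h hjsym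
        omega
      · rcases List.mem_cons.1 h with hEq | h'
        · have : j = i := congrArg Prod.fst hEq
          omega
        · have hpw := pairwise_candN a
          rw [heq] at hpw
          have hcross := (List.pairwise_append.1 hpw).2.1
          have hlex := (List.pairwise_cons.1 hcross).1 _ h'
          rcases hlex with h'' | ⟨h'', -⟩ <;> simp at h'' <;> omega
    have hfi : bestStartM a e a.length = i := by
      rw [bestStartM, hLen]
      exact findIdx_range_eq _ _ i (by omega) hpred hnone
    rw [theBest, hfi, hLen]
    exact hr2

-- ---------- B side ----------

def rowB (a : List Int) (e : Int) (len : Nat) : List Bool :=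
  (List.range (a.length - len + 1)).map (fun i => symB a e i len)

lemma bestLenM_zero (a : List Int) (e : Int) : bestLenM a e 0 = 0 := rfl

lemma bestStartM_of_len_zero (a : List Int) (e : Int) (m : Nat) (h : bestLenM a e m = 0) :
    bestStartM a e m = 0 := by
  rw [bestStartM, h]
  apply findIdx_range_eq _ _ 0 (by omega)
  · simp [startP, symB_zero]
  · omega

lemma rowB_one (a : List Int) (e : Int) (h : 1 ≤ a.length) :
    rowB a e 1 = List.replicate a.length true := by
  rw [rowB]
  have h1 : a.length - 1 + 1 = a.length := by omega
  rw [h1]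
  rw [show (fun i => symB a e i 1) = (fun _ : Nat => true) from funext (fun i => symB_one a e i)]
  simp [List.map_const']

lemma cur_one (a : List Int) (e : Int) (h : 1 ≤ a.length) :
    List.replicate ((a.length : Int)).toNat true = rowB a e 1 := by
  rw [rowB_one a e h]; simp

lemma cur_two (a : List Int) (e : Int) (h : 2 ≤ a.length) :
    (PySem.List.pyRange 0 ((a.length : Int) - 1) 1).map (fun i =>
        decide (|PySem.List.pyGetD a i 0 - PySem.List.pyGetD a (i + 1) 0| ≤ e))
      = rowB a e 2 := by
  have hc : ((a.length : Int) - 1) = ((a.length - 1 : Nat) : Int) := by omega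
  rw [hc, PySem.List.pyRange_zero_nat, List.map_map, rowB]
  have h1 : a.length - 2 + 1 = a.length - 1 := by omega
  rw [h1]
  apply List.map_congr_left
  intro k _
  simp only [Function.comp_apply, PySem.List.pyGetD_natCast]
  have hc2 : ((k : Int) + 1) = ((k + 1 : Nat) : Int) := by push_cast; ring
  rw [hc2]
  simp only [PySem.List.pyGetD_natCast]
  rw [symB_two]

lemma rowB_getD (a : List Int) (e : Int) (len k : Nat) (h : k < a.length - len + 1) :
    (rowB a e len).getD k false = symB a e k len := by
  rw [rowB]; exact getD_map_range' _ _ _ h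

lemma cur_big (a : List Int) (e : Int) (m : Nat) (h2 : 2 ≤ m) (hm : m + 1 ≤ a.length) :
    (PySem.List.pyRange 0 ((a.length : Int) - ((m : Int) + 1) + 1) 1).map (fun i =>
        decide (|PySem.List.pyGetD a i 0 - PySem.List.pyGetD a (i + ((m : Int) + 1) - 1) 0| ≤ e)
          && PySem.List.pyGetD (rowB a e (m - 1)) (i + 1) false)
      = rowB a e (m + 1) := by
  have hc : ((a.length : Int) - ((m : Int) + 1) + 1) = ((a.length - (m + 1) + 1 : Nat) : Int) := by
    omega
  rw [hc, PySem.List.pyRange_zero_nat, List.map_map]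
  conv_rhs => rw [rowB]
  apply List.map_congr_left
  intro k hk
  have hk' : k < a.length - (m + 1) + 1 := by simpa using hk
  simp only [Function.comp_apply]
  have hc2 : ((k : Int) + ((m : Int) + 1) - 1) = ((k + m : Nat) : Int) := by push_cast; ring
  have hc3 : ((k : Int) + 1) = ((k + 1 : Nat) : Int) := by push_cast; ring
  rw [hc2, hc3]
  simp only [PySem.List.pyGetD_natCast]
  rw [rowB_getD a e (m - 1) (k + 1) (by omega), symB_step a e k (m + 1) (by omega)]
  have i1 : k + (m + 1) - 1 = k + m := by omega
  have i2 : m + 1 - 2 = m - 1 := by omega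
  rw [i1, i2]

lemma best_update_some (a : List Int) (e : Int) (m : Nat) (hm : m + 1 ≤ a.length)
    (hh : hasB a e (m + 1) = true) :
    ∃ k, (rowB a e (m + 1)).findIdx? (fun b => b) = some k ∧
      bestLenM a e (m + 1) = m + 1 ∧ bestStartM a e (m + 1) = k := by
  have hex : ∃ i, startP a e (m + 1) i = true := by
    obtain ⟨i, h1, h2⟩ := (hasB_iff a e (m + 1)).1 hh
    exact ⟨i, by simp [startP, h1, h2]⟩
  have hk : startP a e (m + 1) (Nat.find hex) = true := Nat.find_spec hex
  have hklow : ∀ j, j < Nat.find hex → startP a e (m + 1) j = false := by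
    intro j hj
    have hmin := Nat.find_min hex hj
    cases hq : startP a e (m + 1) j
    · rfl
    · exact absurd hq hmin
  generalize hgen : Nat.find hex = k at hk hklow
  have hk12 : k + (m + 1) ≤ a.length ∧ symB a e k (m + 1) = true := by
    have h := hk
    simp only [startP, Bool.and_eq_true, decide_eq_true_eq] at h
    exact h
  obtain ⟨hk1, hk2⟩ := hk12
  have hL : bestLenM a e (m + 1) = m + 1 := by
    rw [bestLenM, Nat.findGreatest_succ, if_pos hh]
  refine ⟨k, ?_, hL, ?_⟩
  · rw [rowB, List.findIdx?_map, List.findIdx?_eq_some_iff_findIdx_eq]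
    refine ⟨by simp; omega, ?_⟩
    have hco : ((fun b => b) ∘ fun i => symB a e i (m + 1)) = fun i => symB a e i (m + 1) := rfl
    rw [hco]
    refine findIdx_range_eq (fun i => symB a e i (m + 1)) (a.length - (m + 1) + 1) k
      (by omega) hk2 ?_
    intro j hj
    have hjs := hklow j hj
    have hg : j + (m + 1) ≤ a.length := by omega
    cases hq : symB a e j (m + 1)
    · exact hq
    · exfalso
      rw [startP] at hjs
      simp [hg, hq] at hjs
  · rw [bestStartM, hL]
    exact findIdx_range_eq (startP a e (m + 1)) (a.length + 1) k (by omega) hk hklow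

lemma best_update_none (a : List Int) (e : Int) (m : Nat) (hm : m + 1 ≤ a.length)
    (hh : ¬ hasB a e (m + 1) = true) :
    (rowB a e (m + 1)).findIdx? (fun b => b) = none ∧
      bestLenM a e (m + 1) = bestLenM a e m ∧ bestStartM a e (m + 1) = bestStartM a e m := by
  have hh' : ∀ i, i + (m + 1) ≤ a.length → symB a e i (m + 1) = false := by
    intro i hi
    cases hq : symB a e i (m + 1)
    · rfl
    · exact absurd ((hasB_iff a e (m + 1)).2 ⟨i, hi, hq⟩) hh
  refine ⟨?_, ?_, ?_⟩
  · rw [rowB, List.findIdx?_map, List.findIdx?_eq_none_iff]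
    intro x hx
    have hx' : x < a.length - (m + 1) + 1 := by simpa using hx
    have : symB a e x (m + 1) = false := hh' x (by omega)
    simpa using this
  · rw [bestLenM, bestLenM, Nat.findGreatest_succ, if_neg hh]
  · have hL : bestLenM a e (m + 1) = bestLenM a e m := by
      rw [bestLenM, bestLenM, Nat.findGreatest_succ, if_neg hh]
    rw [bestStartM, bestStartM, hL]

lemma B_inv (a : List Int) (e : Int) :
    ∀ m, m ≤ a.length →
      (PySem.List.pyRange 1 ((m : Int) + 1) 1).foldl (blt_step a e)
          (([] : List Bool), ([] : List Bool), (0 : Int), (0 : Int))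
        = ((if 2 ≤ m then rowB a e (m - 1) else []),
           (if 1 ≤ m then rowB a e m else []),
           ((bestLenM a e m : Int), (bestStartM a e m : Int))) := by
  intro m
  induction m with
  | zero =>
    intro _
    rw [PySem.List.pyRange_one_eq_nil (by norm_num)]
    simp [bestLenM_zero, bestStartM_of_len_zero a e 0 rfl]
  | succ m ih =>
    intro hm1
    have hm : m ≤ a.length := by omega
    have hsplit : PySem.List.pyRange 1 (((m + 1 : Nat) : Int) + 1) 1
        = PySem.List.pyRange 1 ((m : Int) + 1) 1 ++ [(m : Int) + 1] := by
      have hc : ((m + 1 : Nat) : Int) + 1 = ((m : Int) + 1) + 1 := by push_cast; ring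
      rw [hc, PySem.List.pyRange_one_succ_right (by omega)]
    rw [hsplit, List.foldl_append, ih hm]
    simp only [List.foldl_cons, List.foldl_nil]
    by_cases hm0 : m = 0
    · -- processed length is 1
      rw [if_neg (show ¬ (2 ≤ m) by omega), if_neg (show ¬ (1 ≤ m) by omega)]
      simp only [blt_step, PySem.List.len_eq]
      rw [if_pos (show ((m : Int) + 1 = 1) by omega), cur_one a e (by omega)]
      by_cases hh : hasB a e (m + 1) = true
      · obtain ⟨k, hrow, hL, hS⟩ := best_update_some a e m hm1 hh
        rw [show rowB a e (m + 1) = rowB a e 1 by rw [hm0]] at hrow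
        rw [hrow]
        dsimp only
        rw [if_neg (show ¬ 2 ≤ m + 1 by omega), if_pos (show 1 ≤ m + 1 by omega)]
        refine Prod.ext ?_ (Prod.ext ?_ (Prod.ext ?_ ?_)) <;> dsimp only
        · rw [show m + 1 = 1 by omega]
        · rw [hL]; push_cast; ring
        · rw [hS]
      · obtain ⟨hrow, hL, hS⟩ := best_update_none a e m hm1 hh
        rw [show rowB a e (m + 1) = rowB a e 1 by rw [hm0]] at hrow
        rw [hrow]
        dsimp only
        rw [if_neg (show ¬ 2 ≤ m + 1 by omega), if_pos (show 1 ≤ m + 1 by omega)]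
        refine Prod.ext ?_ (Prod.ext ?_ (Prod.ext ?_ ?_)) <;> dsimp only
        · rw [show m + 1 = 1 by omega]
        · rw [hL]
        · rw [hS]
    · by_cases hm1b : m = 1
      · -- processed length is 2
        rw [if_neg (show ¬ (2 ≤ m) by omega), if_pos (show 1 ≤ m by omega)]
        simp only [blt_step, PySem.List.len_eq]
        rw [if_neg (show ¬ ((m : Int) + 1 = 1) by omega),
            if_pos (show ((m : Int) + 1 = 2) by omega),
            cur_two a e (by omega)]
        by_cases hh : hasB a e (m + 1) = true
        · obtain ⟨k, hrow, hL, hS⟩ := best_update_some a e m hm1 hh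
          rw [show rowB a e (m + 1) = rowB a e 2 by rw [hm1b]] at hrow
          rw [hrow]
          dsimp only
          rw [if_pos (show 2 ≤ m + 1 by omega), if_pos (show 1 ≤ m + 1 by omega)]
          refine Prod.ext ?_ (Prod.ext ?_ (Prod.ext ?_ ?_)) <;> dsimp only
          · rw [show m + 1 - 1 = m by omega]
          · rw [show m + 1 = 2 by omega]
          · rw [hL]; push_cast; ring
          · rw [hS]
        · obtain ⟨hrow, hL, hS⟩ := best_update_none a e m hm1 hh
          rw [show rowB a e (m + 1) = rowB a e 2 by rw [hm1b]] at hrow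
          rw [hrow]
          dsimp only
          rw [if_pos (show 2 ≤ m + 1 by omega), if_pos (show 1 ≤ m + 1 by omega)]
          refine Prod.ext ?_ (Prod.ext ?_ (Prod.ext ?_ ?_)) <;> dsimp only
          · rw [show m + 1 - 1 = m by omega]
          · rw [show m + 1 = 2 by omega]
          · rw [hL]
          · rw [hS]
      · -- processed length is at least 3
        have h2m : 2 ≤ m := by omega
        rw [if_pos (show 2 ≤ m by omega), if_pos (show 1 ≤ m by omega)]
        simp only [blt_step, PySem.List.len_eq]
        rw [if_neg (show ¬ ((m : Int) + 1 = 1) by omega),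
            if_neg (show ¬ ((m : Int) + 1 = 2) by omega),
            cur_big a e m h2m hm1]
        by_cases hh : hasB a e (m + 1) = true
        · obtain ⟨k, hrow, hL, hS⟩ := best_update_some a e m hm1 hh
          rw [hrow]
          dsimp only
          rw [if_pos (show 2 ≤ m + 1 by omega), if_pos (show 1 ≤ m + 1 by omega)]
          refine Prod.ext ?_ (Prod.ext ?_ (Prod.ext ?_ ?_)) <;> dsimp only
          · rw [show m + 1 - 1 = m by omega]
          · rw [hL]; push_cast; ring
          · rw [hS]
        · obtain ⟨hrow, hL, hS⟩ := best_update_none a e m hm1 hh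
          rw [hrow]
          dsimp only
          rw [if_pos (show 2 ≤ m + 1 by omega), if_pos (show 1 ≤ m + 1 by omega)]
          refine Prod.ext ?_ (Prod.ext ?_ (Prod.ext ?_ ?_)) <;> dsimp only
          · rw [show m + 1 - 1 = m by omega]
          · rw [hL]
          · rw [hS]

lemma B_char (a : List Int) (e : Int) :
    find_longest_symmetric_sequence_alt a e = theBest a e := by
  simp only [find_longest_symmetric_sequence_alt, PySem.List.len_eq]
  rw [B_inv a e a.length le_rfl]
  dsimp only
  rw [PySem.List.slice_natCast_add]
  rfl

-- ===== VERDICT (by name: the statement is the Claim_ definition above) =====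
theorem find_longest_symmetric_sequence_spec : Claim_equal_find_longest_symmetric_sequence := by
  intro sequence epsilon _
  unfold Spec_find_longest_symmetric_sequence
  rw [A_char, B_char]
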